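-- pv_equiv track=rewrite | github.com/mhsuab/ComputerSecurity2020 | reverse/HW0x08/wishMachine/solve.py | sub_40102d
-- ===== SOURCE A (Python) =====
-- def sub_40102d(_input):
--     v1 = 0
--     for i in range(_input):
--         if (i & 1):
--             v1 += 2
--         else:
--             v1 += 11
--     return v1
-- ===== SOURCE B (Python) =====
-- def sub_40102d(_input):
--     if _input <= 0:
--         return 0
--     return 11 * ((_input + 1) // 2) + 2 * (_input // 2)
-- ===== Notes on version B (the rewrite author's own statement) =====
-- stated objective: faster
-- what changed: Replaces the linear loop that adds a per-index amount depending on index parity with a constant-time closed form built from the counts of even and odd indices.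
import Mathlib
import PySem

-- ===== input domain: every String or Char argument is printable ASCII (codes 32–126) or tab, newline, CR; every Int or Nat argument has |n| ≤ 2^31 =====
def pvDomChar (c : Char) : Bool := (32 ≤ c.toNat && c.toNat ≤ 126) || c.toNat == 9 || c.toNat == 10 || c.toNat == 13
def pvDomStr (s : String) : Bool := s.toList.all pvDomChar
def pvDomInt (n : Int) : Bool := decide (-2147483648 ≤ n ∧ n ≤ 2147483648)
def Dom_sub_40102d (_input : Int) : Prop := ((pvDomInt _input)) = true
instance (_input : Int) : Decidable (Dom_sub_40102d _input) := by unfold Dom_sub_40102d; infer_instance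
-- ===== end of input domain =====

-- B replaces A's linear parity loop by a constant-time closed form over even/odd index counts (objective: faster).

-- ===== PORT A =====
def sub_40102d (_input : Int) : Int :=
  (PySem.List.pyRange 0 _input 1).foldl
    (fun v1 i => if Int.land i 1 ≠ 0 then v1 + 2 else v1 + 11) 0

-- ===== PORT B =====
def sub_40102d_alt (_input : Int) : Int :=
  if _input ≤ 0 then 0
  else 11 * PySem.Int.floordiv (_input + 1) 2 + 2 * PySem.Int.floordiv _input 2

-- ===== PRECONDITION & SPEC =====
def Spec_sub_40102d (_input : Int) (out : Int) : Prop := out = sub_40102d_alt _input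
instance (_input : Int) (out : Int) : Decidable (Spec_sub_40102d _input out) := by unfold Spec_sub_40102d; infer_instance

-- ===== CLAIM (what is proved, stated in full; the proofs are below) =====
def Claim_equal_sub_40102d : Prop := ∀ (_input : Int), Dom_sub_40102d _input → Spec_sub_40102d _input (sub_40102d _input)

-- ===== LEMMAS AND PROOFS =====

theorem pv_land_cast (k : Nat) : Int.land (k : Int) 1 = ((k &&& 1 : Nat) : Int) := rfl

theorem pv_closed (n : Nat) :
    (PySem.List.pyRange 0 (n : Int) 1).foldl
      (fun v1 i => if Int.land i 1 ≠ 0 then v1 + 2 else v1 + 11) 0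
      = 11 * (((n : Int) + 1) / 2) + 2 * ((n : Int) / 2) := by
  induction n with
  | zero => simp [PySem.List.pyRange_one_eq_nil (le_refl (0 : Int))]
  | succ k ih =>
    rw [show ((k + 1 : Nat) : Int) = (k : Int) + 1 by push_cast; ring,
        PySem.List.pyRange_one_succ_right (by positivity),
        List.foldl_append, ih]
    simp only [List.foldl_cons, List.foldl_nil, pv_land_cast, Nat.and_one_is_mod]
    rcases Nat.even_or_odd k with ⟨m, hm⟩ | ⟨m, hm⟩ <;> subst hm <;>
      split <;> push_cast <;> omega

-- ===== VERDICT (by name: the statement is the Claim_ definition above) =====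
theorem sub_40102d_spec : Claim_equal_sub_40102d := by
  intro n _
  unfold Spec_sub_40102d sub_40102d sub_40102d_alt
  by_cases h : n ≤ 0
  · rw [PySem.List.pyRange_one_eq_nil h, if_pos h]
    rfl
  · rw [if_neg h]
    obtain ⟨m, rfl⟩ : ∃ m : Nat, n = (m : Int) := ⟨n.toNat, by omega⟩
    rw [pv_closed,
        PySem.Int.floordiv_eq_ediv_of_pos (by norm_num),
        PySem.Int.floordiv_eq_ediv_of_pos (by norm_num)]
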